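-- pv_equiv track=rewrite | github.com/DoyelMishra15/DSA | Strings/beautySum.py | beautySum
-- ===== SOURCE A (Python) =====
-- def beautySum(s: str) -> int:
--     ans=0
--     for i in range(len(s)):
--         cnt=0
--         d={}
--         for j in range(i,len(s)):
--             d[s[j]]=d.get(s[j],0)+1
--             cnt=max(d.values())-min(d.values())
--             ans+=cnt
--     return ans
-- ===== SOURCE B (Python) =====
-- def beautySum(s: str) -> int:
--     n = len(s)
--     # prefix frequency table: pre[k] maps each char to its count in s[:k]
--     pre = [{}]
--     for ch in s:
--         row = dict(pre[-1])
--         row[ch] = row.get(ch, 0) + 1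
--         pre.append(row)
--     ans = 0
--     for i in range(n):
--         for j in range(i, n):
--             hi = pre[j + 1]
--             lo = pre[i]
--             diffs = [hi[c] - lo.get(c, 0) for c in hi if hi[c] > lo.get(c, 0)]
--             ans += max(diffs) - min(diffs)
--     return ans
-- ===== Notes on version B (the rewrite author's own statement) =====
-- stated objective: alternative
-- what changed: B first builds a prefix-frequency table (pre[k] = char counts of s[:k]) and then derives each substring's positive character counts by table differences pre[j+1][c]-pre[i][c], instead of A's incrementally grown per-start dictionary with a running max-min per step.
import Mathlib
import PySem

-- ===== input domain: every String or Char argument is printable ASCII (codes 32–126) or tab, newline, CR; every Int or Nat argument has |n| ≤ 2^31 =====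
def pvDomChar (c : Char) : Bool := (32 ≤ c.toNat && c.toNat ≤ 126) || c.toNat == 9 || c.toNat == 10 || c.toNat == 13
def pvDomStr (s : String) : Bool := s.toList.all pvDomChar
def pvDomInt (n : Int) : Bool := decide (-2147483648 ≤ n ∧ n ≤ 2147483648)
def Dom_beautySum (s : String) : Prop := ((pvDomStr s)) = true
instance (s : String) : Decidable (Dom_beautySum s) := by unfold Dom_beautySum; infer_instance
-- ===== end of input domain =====

-- B replaces A's incrementally grown per-start frequency dict by a prefix-frequency table
-- queried by differences pre[j+1][c]-pre[i][c]; an alternative decomposition of similar cost.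

-- ===== PORT A =====
-- the body of A's inner loop: d[s[j]] = d.get(s[j],0)+1; cnt = max(d.values())-min(d.values()); ans += cnt
def stepA (st : Int × PySem.Dict Char Int × Int) (c : Char) : Int × PySem.Dict Char Int × Int :=
  let d := st.2.1.insert c (st.2.1.getD c 0 + 1)
  let cnt := (PySem.List.max? d.values (fun v => v)).getD 0
           - (PySem.List.min? d.values (fun v => v)).getD 0
  (cnt, d, st.2.2 + cnt)

def beautySum (s : String) : Int :=
  let cs := s.toList
  (PySem.List.pyRange 0 (PySem.List.len cs)).foldl (fun ans i =>
    ((PySem.List.pyRange i (PySem.List.len cs)).foldl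
      (fun st j => stepA st (PySem.List.pyGetD cs j ' '))  -- s[j]; j is always in range here, and d is never empty at max/min
      (0, PySem.Dict.empty, ans)).2.2) 0

-- ===== PORT B =====
-- one step of building the prefix table: row = dict(pre[-1]); row[ch] = row.get(ch,0)+1; pre.append(row)
def rowStep (rows : List (PySem.Dict Char Int)) (ch : Char) : List (PySem.Dict Char Int) :=
  let row := PySem.List.pyGetD rows (-1) PySem.Dict.empty
  rows ++ [row.insert ch (row.getD ch 0 + 1)]

def beautySum_alt (s : String) : Int :=
  let cs := s.toList
  let n := PySem.List.len cs
  let pre := cs.foldl rowStep [PySem.Dict.empty]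
  (PySem.List.pyRange 0 n).foldl (fun ans i =>
    (PySem.List.pyRange i n).foldl (fun ans j =>
      let hi := PySem.List.pyGetD pre (j + 1) PySem.Dict.empty  -- pre[j+1]; index always in range here
      let lo := PySem.List.pyGetD pre i PySem.Dict.empty        -- pre[i]
      let diffs := (hi.keys.filter (fun c => decide (lo.getD c 0 < hi.getD c 0))).map
        (fun c => hi.getD c 0 - lo.getD c 0)                    -- [hi[c]-lo.get(c,0) for c in hi if hi[c] > lo.get(c,0)]
      ans + ((PySem.List.max? diffs (fun v => v)).getD 0
           - (PySem.List.min? diffs (fun v => v)).getD 0)) ans) 0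

-- ===== PRECONDITION & SPEC =====
def Spec_beautySum (s : String) (out : Int) : Prop := out = beautySum_alt s
instance (s : String) (out : Int) : Decidable (Spec_beautySum s out) := by unfold Spec_beautySum; infer_instance

-- ===== CLAIM (what is proved, stated in full; the proofs are below) =====
def Claim_equal_beautySum : Prop := ∀ (s : String), Dom_beautySum s → Spec_beautySum s (beautySum s)

-- ===== LEMMAS AND PROOFS =====

-- max(xs) - min(xs), with 0 for the (never reached) empty case
def mmv (xs : List Int) : Int :=
  (PySem.List.max? xs (fun v => v)).getD 0 - (PySem.List.min? xs (fun v => v)).getD 0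

theorem max?_perm {xs ys : List Int} (h : xs.Perm ys) :
    PySem.List.max? xs (fun v => v) = PySem.List.max? ys (fun v => v) := by
  cases hx : PySem.List.max? xs (fun v => v) with
  | none =>
    rw [PySem.List.max?_eq_none_iff] at hx
    subst hx
    rw [List.nil_perm.mp h]
    simp [PySem.List.max?]
  | some m =>
    cases hy : PySem.List.max? ys (fun v => v) with
    | none =>
      rw [PySem.List.max?_eq_none_iff] at hy
      subst hy
      rw [List.nil_perm.mp h.symm] at hx
      simp [PySem.List.max?] at hx
    | some m' =>
      have h1 := PySem.List.max?_isMax hy (m) (h.mem_iff.mp (PySem.List.max?_mem hx))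
      have h2 := PySem.List.max?_isMax hx (m') (h.mem_iff.mpr (PySem.List.max?_mem hy))
      exact congrArg some (le_antisymm h1 h2)

theorem min?_perm {xs ys : List Int} (h : xs.Perm ys) :
    PySem.List.min? xs (fun v => v) = PySem.List.min? ys (fun v => v) := by
  cases hx : PySem.List.min? xs (fun v => v) with
  | none =>
    rw [PySem.List.min?_eq_none_iff] at hx
    subst hx
    rw [List.nil_perm.mp h]
    simp [PySem.List.min?]
  | some m =>
    cases hy : PySem.List.min? ys (fun v => v) with
    | none =>
      rw [PySem.List.min?_eq_none_iff] at hy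
      subst hy
      rw [List.nil_perm.mp h.symm] at hx
      simp [PySem.List.min?] at hx
    | some m' =>
      have h1 := PySem.List.min?_isMin hy (m) (h.mem_iff.mp (PySem.List.min?_mem hx))
      have h2 := PySem.List.min?_isMin hx (m') (h.mem_iff.mpr (PySem.List.min?_mem hy))
      exact congrArg some (le_antisymm h2 h1)

theorem mmv_perm {xs ys : List Int} (h : xs.Perm ys) : mmv xs = mmv ys := by
  unfold mmv
  rw [max?_perm h, min?_perm h]

-- the amount A's inner loop adds to ans when it consumes l starting from dict d
def asum (d : PySem.Dict Char Int) : List Char → Int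
  | [] => 0
  | c :: r =>
    let d' := d.insert c (d.getD c 0 + 1)
    mmv d'.values + asum d' r

theorem innerA_eq (l : List Char) :
    ∀ (d : PySem.Dict Char Int) (cnt ans : Int),
    (l.foldl stepA (cnt, d, ans)).2.2 = ans + asum d l := by
  induction l with
  | nil => intro d cnt ans; simp [asum]
  | cons c r ih =>
    intro d cnt ans
    simp only [List.foldl_cons, stepA, asum, ih, mmv]
    ring

theorem asum_counter (l : List Char) : ∀ (t : List Char),
    asum (PySem.Dict.counter t) l
      = ((List.range l.length).map
          (fun k => mmv (PySem.Dict.counter (t ++ l.take (k + 1))).values)).sum := by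
  induction l with
  | nil => intro t; simp [asum]
  | cons c r ih =>
    intro t
    have hstep : (PySem.Dict.counter t).insert c ((PySem.Dict.counter t).getD c 0 + 1)
        = PySem.Dict.counter (t ++ [c]) := by
      rw [PySem.Dict.counter_append_singleton]; rfl
    simp only [asum, hstep, ih (t ++ [c])]
    rw [List.length_cons, List.range_succ_eq_map]
    simp only [List.map_cons, List.map_map, List.sum_cons, List.take_succ_cons, List.take_zero]
    congr 1
    refine congrArg (α := List Int) List.sum (List.map_congr_left ?_)
    intro k hk
    simp [Function.comp, List.append_assoc]

theorem pyGetD_neg_one {α : Type} (xs : List α) (d : α) (h : xs ≠ []) :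
    PySem.List.pyGetD xs (-1) d = xs.getLast h := by
  have hl : 0 < xs.length := List.length_pos_iff.mpr h
  simp only [PySem.List.pyGetD, PySem.List.pyGet?, PySem.List.pyIdx?]
  rw [if_neg (by omega), if_pos (by exact_mod_cast by omega)]
  simp only [Option.bind_some]
  rw [List.getLast_eq_getElem]
  rw [List.getElem?_eq_getElem (by omega)]
  rfl

-- the prefix table B builds is the table of prefix Counters
theorem pre_spec (l : List Char) : ∀ (t : List Char),
    l.foldl rowStep ((List.range (t.length + 1)).map (fun k => PySem.Dict.counter (t.take k)))
      = (List.range (t.length + l.length + 1)).map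
          (fun k => PySem.Dict.counter ((t ++ l).take k)) := by
  induction l with
  | nil =>
    intro t
    simp
  | cons c r ih =>
    intro t
    rw [List.foldl_cons]
    have hne : ((List.range (t.length + 1)).map (fun k => PySem.Dict.counter (t.take k))) ≠ [] := by
      simp
    have hlast : ((List.range (t.length + 1)).map (fun k => PySem.Dict.counter (t.take k))).getLast hne
        = PySem.Dict.counter t := by
      rw [List.getLast_eq_getElem]
      simp
    have hrow : rowStep ((List.range (t.length + 1)).map (fun k => PySem.Dict.counter (t.take k))) c
        = (List.range ((t ++ [c]).length + 1)).map (fun k => PySem.Dict.counter ((t ++ [c]).take k)) := by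
      simp only [rowStep, pyGetD_neg_one _ _ hne, hlast]
      have hins : (PySem.Dict.counter t).insert c ((PySem.Dict.counter t).getD c 0 + 1)
          = PySem.Dict.counter (t ++ [c]) := by
        rw [PySem.Dict.counter_append_singleton]; rfl
      rw [hins]
      rw [List.length_append, List.length_cons, List.length_nil]
      rw [List.range_succ (n := t.length + 1)]
      rw [List.map_append]
      congr 1
      · apply List.map_congr_left
        intro k hk
        rw [List.mem_range] at hk
        rw [List.take_append_of_le_length (by omega)]
      · simp only [List.map_cons, List.map_nil]
        rw [List.take_of_length_le (by simp)]
    rw [hrow, ih (t ++ [c])]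
    have h1 : (t ++ [c]).length + r.length + 1 = t.length + (c :: r).length + 1 := by
      simp only [List.length_append, List.length_cons, List.length_nil]; omega
    rw [h1, List.append_assoc]
    rfl

theorem values_counter (t : List Char) :
    (PySem.Dict.counter t).values = (PySem.Set.ofList t).map (fun c => (t.count c : Int)) := by
  simp only [PySem.Dict.values, PySem.Dict.items_counter, List.map_map]
  rfl

-- the pointwise core: B's table-difference list is a permutation of A's dict-values list
theorem diffs_perm (p t : List Char) :
    (((PySem.Dict.counter (p ++ t)).keys.filter
        (fun c => decide ((PySem.Dict.counter p).getD c 0 < (PySem.Dict.counter (p ++ t)).getD c 0))).map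
        (fun c => (PySem.Dict.counter (p ++ t)).getD c 0 - (PySem.Dict.counter p).getD c 0)).Perm
      (PySem.Dict.counter t).values := by
  rw [values_counter, PySem.Dict.keys_counter]
  have hfil : ((PySem.Set.ofList (p ++ t)).filter
      (fun c => decide ((PySem.Dict.counter p).getD c 0 < (PySem.Dict.counter (p ++ t)).getD c 0)))
      = ((PySem.Set.ofList (p ++ t)).filter (fun c => decide (c ∈ t))) := by
    apply List.filter_congr
    intro c _
    simp only [PySem.Dict.getD_counter, List.count_append, decide_eq_decide]
    constructor
    · intro h
      have : 0 < t.count c := by push_cast at h; omega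
      exact List.count_pos_iff.mp this
    · intro h
      have : 0 < t.count c := List.count_pos_iff.mpr h
      push_cast
      omega
  rw [hfil]
  rw [List.map_congr_left (l := (PySem.Set.ofList (p ++ t)).filter (fun c => decide (c ∈ t)))
      (g := fun c => (t.count c : Int))
      (by intro c _; simp only [PySem.Dict.getD_counter, List.count_append]; push_cast; ring)]
  apply List.Perm.map
  rw [List.perm_ext_iff_of_nodup ((PySem.Set.nodup_ofList _).filter _) (PySem.Set.nodup_ofList _)]
  intro c
  simp only [List.mem_filter, PySem.Set.mem_ofList, List.mem_append, decide_eq_true_eq]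
  constructor
  · exact fun h => h.2
  · exact fun h => ⟨Or.inr h, h⟩

theorem lookup_map_range {α : Type} (f : Nat → α) (m : Nat) (x : Int) (d : α)
    (h0 : 0 ≤ x) (h1 : x < (m : Int)) :
    PySem.List.pyGetD ((List.range m).map f) x d = f x.toNat := by
  simp only [PySem.List.pyGetD, PySem.List.pyGet?, PySem.List.pyIdx?, List.length_map,
    List.length_range]
  rw [if_pos h0, if_pos h1]
  simp only [Option.bind_some]
  rw [List.getElem?_map, List.getElem?_range (by omega)]
  rfl

-- a nested accumulate-in-place loop is a nested sum
theorem foldl_foldl_add (n : Int) (F : Int → Int → Int) :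
    (PySem.List.pyRange 0 n).foldl
      (fun ans i => (PySem.List.pyRange i n).foldl (fun ans j => ans + F i j) ans) 0
    = ((PySem.List.pyRange 0 n).map (fun i => ((PySem.List.pyRange i n).map (F i)).sum)).sum := by
  have h : ∀ (ans i : Int), i ∈ PySem.List.pyRange 0 n →
      (PySem.List.pyRange i n).foldl (fun ans j => ans + F i j) ans
        = ans + ((PySem.List.pyRange i n).map (F i)).sum := by
    intro ans i _
    exact PySem.List.foldl_add _ _ _
  rw [PySem.List.foldl_congr_mem _ _ _ _ h, PySem.List.foldl_add]
  simp

-- A's whole computation as a sum of per-start contributions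
theorem A_to_sum (cs : List Char) :
    (PySem.List.pyRange 0 (PySem.List.len cs)).foldl
      (fun ans i => ((PySem.List.pyRange i (PySem.List.len cs)).foldl
        (fun st j => stepA st (PySem.List.pyGetD cs j ' '))
        (0, PySem.Dict.empty, ans)).2.2) 0
    = ((PySem.List.pyRange 0 (PySem.List.len cs)).map
        (fun i => asum PySem.Dict.empty (cs.drop i.toNat))).sum := by
  have h : ∀ (ans i : Int), i ∈ PySem.List.pyRange 0 (PySem.List.len cs) →
      ((PySem.List.pyRange i (PySem.List.len cs)).foldl
        (fun st j => stepA st (PySem.List.pyGetD cs j ' '))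
        (0, PySem.Dict.empty, ans)).2.2
        = ans + asum PySem.Dict.empty (cs.drop i.toNat) := by
    intro ans i hi
    have h0 : (0 : Int) ≤ i := (PySem.List.mem_pyRange_one.mp hi).1
    rw [PySem.List.foldl_pyRange_pyGetD cs ' ' stepA (0, PySem.Dict.empty, ans) h0]
    exact innerA_eq _ _ _ _
  rw [PySem.List.foldl_congr_mem _ _ _ _ h, PySem.List.foldl_add]
  simp

theorem main_eq (s : String) : beautySum s = beautySum_alt s := by
  simp only [beautySum, beautySum_alt]
  set cs := s.toList with hcs
  have hlen : PySem.List.len cs = (cs.length : Int) := by simp [PySem.List.len]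
  have hpre : cs.foldl rowStep [PySem.Dict.empty]
      = (List.range (cs.length + 1)).map (fun k => PySem.Dict.counter (cs.take k)) := by
    have h0 : [(PySem.Dict.empty : PySem.Dict Char Int)]
        = (List.range (([] : List Char).length + 1)).map
            (fun k => PySem.Dict.counter (([] : List Char).take k)) := rfl
    rw [h0, pre_spec cs []]
    simp
  rw [hpre, A_to_sum cs, foldl_foldl_add]
  refine congrArg (α := List Int) List.sum (List.map_congr_left ?_)
  intro i hi
  obtain ⟨h0i, h1i⟩ := PySem.List.mem_pyRange_one.mp hi
  rw [hlen] at h1i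
  have hasum : asum PySem.Dict.empty (cs.drop i.toNat)
      = ((List.range (cs.drop i.toNat).length).map
          (fun k => mmv (PySem.Dict.counter ((cs.drop i.toNat).take (k + 1))).values)).sum := by
    have := asum_counter (cs.drop i.toNat) []
    simpa using this
  rw [hasum]
  rw [hlen, PySem.List.pyRange_one i (cs.length : Int), List.map_map]
  have hlen2 : ((cs.length : Int) - i).toNat = (cs.drop i.toNat).length := by
    simp [List.length_drop]; omega
  rw [hlen2]
  refine congrArg (α := List Int) List.sum (List.map_congr_left ?_)
  intro k hk
  rw [List.mem_range, List.length_drop] at hk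
  simp only [Function.comp]
  rw [lookup_map_range _ _ _ _ (by omega) (by push_cast; omega),
      lookup_map_range _ _ _ _ (by omega) (by push_cast; omega)]
  have e1 : (i + (k : Int) + 1).toNat = i.toNat + (k + 1) := by omega
  rw [e1]
  have hsplit : cs.take (i.toNat + (k + 1)) = cs.take i.toNat ++ (cs.drop i.toNat).take (k + 1) := by
    rw [List.take_add]
  rw [hsplit]
  exact (mmv_perm (diffs_perm (cs.take i.toNat) ((cs.drop i.toNat).take (k + 1)))).symm

-- ===== VERDICT (by name: the statement is the Claim_ definition above) =====
theorem beautySum_spec : Claim_equal_beautySum := fun s _ => main_eq s
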